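-- pv_equiv track=rewrite | github.com/titaniumbones/mwp-zotero-tools | packages/zotero-cli/src/zotero_cli/pdf_toc.py | get_chapters_for_page
-- ===== SOURCE A (Python) =====
-- from typing import Dict, List, Optional, Tuple
--
-- def get_chapters_for_page(chapter_map, page_label: str) -> List[Tuple[str, int]]:
--     """
--     Find all ancestor chapter headings for a given page.
--
--     Returns the nearest preceding entry at each TOC level, giving a
--     hierarchical path. For example, a page in subsection "2. The Double
--     Character..." (L2) will return both its parent "Chapter 1" (L1) and
--     the L2 entry itself.
--
--     Args:
--         chapter_map: Sorted list of (title, page_label, level) from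
--             build_chapter_map_from_pdf(). Also accepts legacy 2-tuples
--             (title, page_label) which are treated as level 1.
--         page_label: The page label to look up (from annotationPageLabel).
--
--     Returns:
--         List of (title, level) tuples sorted by level, or empty list if
--         page is before the first chapter.
--     """
--     if not chapter_map:
--         return []
--
--     # Normalize to 3-tuples if legacy 2-tuple format
--     normalized = []
--     for entry in chapter_map:
--         if len(entry) == 2:
--             normalized.append((entry[0], entry[1], 1))
--         else:
--             normalized.append((entry[0], entry[1], entry[2]))
--
--     # Try numeric comparison
--     try:
--         target = int(page_label)
--         return _get_chapters_numeric(normalized, target)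
--     except (ValueError, TypeError):
--         return _get_chapters_nonnumeric(normalized, page_label)
--
-- def _get_chapters_numeric(chapter_map: List[Tuple[str, str, int]], target: int) -> List[Tuple[str, int]]:
--     """Find hierarchical chapters for a numeric page label."""
--     # Build numeric entries preserving level
--     numeric_entries = []
--     for title, lbl, level in chapter_map:
--         try:
--             numeric_entries.append((title, int(lbl), level))
--         except (ValueError, TypeError):
--             continue
--
--     if not numeric_entries:
--         return []
--
--     # Find the nearest preceding entry at each level
--     nearest_by_level: Dict[int, str] = {}
--     for title, page_num, level in numeric_entries:
--         if page_num <= target: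
--             nearest_by_level[level] = title
--             # When a new entry at this level appears, clear deeper levels
--             deeper = [k for k in nearest_by_level if k > level]
--             for k in deeper:
--                 del nearest_by_level[k]
--
--     if not nearest_by_level:
--         return []
--
--     return sorted([(title, level) for level, title in nearest_by_level.items()], key=lambda x: x[1])
--
-- def _get_chapters_nonnumeric(chapter_map: List[Tuple[str, str, int]], page_label: str) -> List[Tuple[str, int]]:
--     """Find chapters for a non-numeric page label (e.g., roman numerals)."""
--     for title, lbl, level in chapter_map:
--         if lbl == page_label:
--             return [(title, level)]
--     return []
-- ===== SOURCE B (Python) =====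
-- from typing import List, Tuple
--
-- def get_chapters_for_page(chapter_map, page_label: str) -> List[Tuple[str, int]]:
--     if not chapter_map:
--         return []
--     normalized = []
--     for entry in chapter_map:
--         if len(entry) == 2:
--             normalized.append((entry[0], entry[1], 1))
--         else:
--             normalized.append((entry[0], entry[1], entry[2]))
--     try:
--         target = int(page_label)
--     except (ValueError, TypeError):
--         return _chapters_nonnumeric(normalized, page_label)
--     return _chapters_numeric(normalized, target)
--
-- def _chapters_numeric(chapter_map: List[Tuple[str, str, int]], target: int) -> List[Tuple[str, int]]:
--     # One pass to keep qualifying (title, level) pairs in order, then a single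
--     # reverse pass with a running minimum level instead of a dict with deletions.
--     qualifying = []
--     for title, lbl, level in chapter_map:
--         try:
--             page_num = int(lbl)
--         except (ValueError, TypeError):
--             continue
--         if page_num <= target:
--             qualifying.append((title, level))
--     path = []
--     min_level = None
--     for title, level in reversed(qualifying):
--         if min_level is None or level < min_level:
--             path.append((title, level))
--             min_level = level
--     return sorted(path, key=lambda x: x[1])
--
-- def _chapters_nonnumeric(chapter_map: List[Tuple[str, str, int]], page_label: str) -> List[Tuple[str, int]]:
--     return next(([(title, level)] for title, lbl, level in chapter_map if lbl == page_label), [])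
-- ===== Notes on version B (the rewrite author's own statement) =====
-- stated objective: alternative
-- what changed: The numeric helper's forward dict pass (overwrite a level, then scan and delete all deeper keys on every qualifying entry) is replaced by one reverse pass over the qualifying entries keeping only a scalar running minimum level, accepting an entry iff its level is strictly below the minimum; the non-numeric branch becomes a next()-over-generator first match; the result is sorted by level as before.
import Mathlib
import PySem

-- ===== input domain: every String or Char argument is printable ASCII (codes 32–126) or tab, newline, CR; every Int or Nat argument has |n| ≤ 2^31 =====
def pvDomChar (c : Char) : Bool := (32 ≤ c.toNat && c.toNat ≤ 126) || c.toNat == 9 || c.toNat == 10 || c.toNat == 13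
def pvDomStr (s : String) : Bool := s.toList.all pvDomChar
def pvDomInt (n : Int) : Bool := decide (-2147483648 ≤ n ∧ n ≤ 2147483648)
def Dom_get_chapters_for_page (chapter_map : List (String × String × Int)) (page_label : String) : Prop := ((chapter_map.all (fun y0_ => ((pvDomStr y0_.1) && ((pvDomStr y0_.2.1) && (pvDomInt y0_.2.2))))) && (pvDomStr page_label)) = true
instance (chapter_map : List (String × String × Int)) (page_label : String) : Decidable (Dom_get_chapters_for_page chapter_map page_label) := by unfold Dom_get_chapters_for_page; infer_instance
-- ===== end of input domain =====

-- B replaces A's forward dict pass (overwrite a level, then scan and delete all deeper keys)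
-- by a single reverse pass over the qualifying entries keeping a scalar running minimum level.

-- ===== PORT A =====
-- _get_chapters_nonnumeric
def pvA_nonnumeric : List (String × String × Int) → String → List (String × Int)
  | [], _ => []
  | e :: rest, lbl => if e.2.1 = lbl then [(e.1, e.2.2)] else pvA_nonnumeric rest lbl

-- the numeric_entries loop of _get_chapters_numeric (try int(lbl) / continue)
def pvA_numericEntries (m : List (String × String × Int)) : List (String × Int × Int) :=
  m.foldl (fun acc e =>
    match PySem.Int.ofStr? e.2.1 with
    | some n => acc ++ [(e.1, n, e.2.2)]
    | none => acc) []

-- one iteration of the nearest_by_level loop: assign, list deeper keys, delete them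
def pvA_step (target : Int) (d : PySem.Dict Int String) (e : String × Int × Int) : PySem.Dict Int String :=
  if e.2.1 ≤ target then
    let d1 := d.insert e.2.2 e.1
    let deeper := d1.keys.filter (fun k => decide (e.2.2 < k))
    deeper.foldl (fun d2 k => d2.erase k) d1
  else d

-- _get_chapters_numeric
def pvA_numeric (m : List (String × String × Int)) (target : Int) : List (String × Int) :=
  let ne := pvA_numericEntries m
  if ne = [] then []
  else
    let d := ne.foldl (pvA_step target) PySem.Dict.empty
    if d.items = [] then []
    else PySem.List.sorted (d.items.map (fun p => (p.2, p.1))) (fun x => x.2)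

def get_chapters_for_page (chapter_map : List (String × String × Int)) (page_label : String) : List (String × Int) :=
  if chapter_map = [] then []
  else
    -- normalization loop; under the type convention every entry is a 3-tuple, so the len==2 branch never fires
    let normalized := chapter_map.foldl (fun acc e => acc ++ [(e.1, e.2.1, e.2.2)]) []
    match PySem.Int.ofStr? page_label with
    | some target => pvA_numeric normalized target
    | none => pvA_nonnumeric normalized page_label

-- ===== PORT B =====
-- _chapters_nonnumeric: next() over a generator = first match (List.find?)
def pvB_nonnumeric (m : List (String × String × Int)) (lbl : String) : List (String × Int) :=
  match m.find? (fun e => e.2.1 == lbl) with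
  | some e => [(e.1, e.2.2)]
  | none => []

-- the qualifying loop of _chapters_numeric
def pvB_qualifying (m : List (String × String × Int)) (target : Int) : List (String × Int) :=
  m.foldl (fun acc e =>
    match PySem.Int.ofStr? e.2.1 with
    | some n => if n ≤ target then acc ++ [(e.1, e.2.2)] else acc
    | none => acc) []

-- _chapters_numeric: reverse pass with running minimum, then sort by level
def pvB_numeric (m : List (String × String × Int)) (target : Int) : List (String × Int) :=
  let q := pvB_qualifying m target
  let st := q.reverse.foldl (fun (st : List (String × Int) × Option Int) e =>
      match st.2 with
      | none => (st.1 ++ [e], some e.2)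
      | some b => if e.2 < b then (st.1 ++ [e], some e.2) else st) ([], none)
  PySem.List.sorted st.1 (fun x => x.2)

def get_chapters_for_page_alt (chapter_map : List (String × String × Int)) (page_label : String) : List (String × Int) :=
  if chapter_map = [] then []
  else
    let normalized := chapter_map.foldl (fun acc e => acc ++ [(e.1, e.2.1, e.2.2)]) []
    match PySem.Int.ofStr? page_label with
    | some target => pvB_numeric normalized target
    | none => pvB_nonnumeric normalized page_label

-- ===== PRECONDITION & SPEC =====
def Spec_get_chapters_for_page (chapter_map : List (String × String × Int)) (page_label : String) (out : List (String × Int)) : Prop := out = get_chapters_for_page_alt chapter_map page_label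
instance (chapter_map : List (String × String × Int)) (page_label : String) (out : List (String × Int)) : Decidable (Spec_get_chapters_for_page chapter_map page_label out) := by unfold Spec_get_chapters_for_page; infer_instance

-- ===== CLAIM (what is proved, stated in full; the proofs are below) =====
def Claim_equal_get_chapters_for_page : Prop := ∀ (chapter_map : List (String × String × Int)) (page_label : String), Dom_get_chapters_for_page chapter_map page_label → Spec_get_chapters_for_page chapter_map page_label (get_chapters_for_page chapter_map page_label)

-- ===== LEMMAS AND PROOFS =====

-- "min_level is None or level < min_level"
def pvLtO (L : Int) (m : Option Int) : Bool := match m with | none => true | some b => decide (L < b)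

-- A's dict step, stated on the items list of a key-sorted dict
def pvAStep (target : Int) (l : List (Int × String)) (e : String × Int × Int) : List (Int × String) :=
  if e.2.1 ≤ target then l.filter (fun p => decide (p.1 < e.2.2)) ++ [(e.2.2, e.1)] else l

-- B's reverse pass, as structural recursion
def pvPass : List (String × Int) → Option Int → List (String × Int)
  | [], _ => []
  | e :: rest, m => if pvLtO e.2 m then e :: pvPass rest (some e.2) else pvPass rest m

-- the qualifying pairs, expressed from A's numeric entries
def pvQualOf (target : Int) (q : List (String × Int × Int)) : List (String × Int) :=
  (q.filter (fun e => decide (e.2.1 ≤ target))).map (fun e => (e.1, e.2.2))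

theorem pv_nonnum_eq : ∀ (l : List (String × String × Int)) (s : String),
    pvA_nonnumeric l s = pvB_nonnumeric l s := by
  intro l s
  induction l with
  | nil => rfl
  | cons e rest ih =>
      unfold pvA_nonnumeric pvB_nonnumeric
      rw [List.find?_cons]
      by_cases h : e.2.1 = s
      · simp [h]
      · have hb : (e.2.1 == s) = false := by simp [h]
        rw [hb, if_neg h]
        exact ih

theorem pv_eraseFold : ∀ (ks : List Int) (d : PySem.Dict Int String),
    (ks.foldl (fun d2 k => d2.erase k) d).items = d.items.filter (fun p => !ks.contains p.1) := by
  intro ks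
  induction ks with
  | nil => intro d; simp
  | cons k ks ih =>
      intro d
      rw [List.foldl_cons, ih]
      show (d.erase k).items.filter _ = _
      simp only [PySem.Dict.erase, List.filter_filter]
      apply List.filter_congr
      intro p _
      simp only [List.contains_cons, Bool.not_or, Bool.and_comm]

theorem pv_step_items (target : Int) (d : PySem.Dict Int String) (e : String × Int × Int)
    (h : d.items.Pairwise (fun p q => p.1 < q.1)) :
    (pvA_step target d e).items = pvAStep target d.items e := by
  unfold pvA_step pvAStep
  split
  case isFalse => rfl
  case isTrue hle =>
  rw [pv_eraseFold]
  by_cases hc : d.contains e.2.2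
  · -- the level is already a key: split the sorted items around it
    have hmem : e.2.2 ∈ d.keys := (PySem.Dict.contains_iff_mem_keys d e.2.2).mp hc
    unfold PySem.Dict.keys at hmem
    obtain ⟨p, hp, hp1⟩ := List.mem_map.mp hmem
    obtain ⟨s, t2, hst⟩ := List.append_of_mem hp
    have hpv : p = (e.2.2, p.2) := by rw [← hp1]
    rw [hpv] at hst
    have hpw := h
    rw [hst] at hpw
    rw [List.pairwise_append] at hpw
    obtain ⟨hpws, hpwc, hcross⟩ := hpw
    have hs : ∀ q ∈ s, q.1 < e.2.2 := fun q hq => hcross q hq _ (List.mem_cons_self)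
    have ht : ∀ q ∈ t2, e.2.2 < q.1 := fun q hq => (List.pairwise_cons.mp hpwc).1 q hq
    have hfix : ∀ (l : List (Int × String)), (∀ q ∈ l, q.1 ≠ e.2.2) →
        l.map (fun p => if (p.1 == e.2.2) = true then (e.2.2, e.1) else p) = l := by
      intro l hl
      induction l with
      | nil => rfl
      | cons a l ih =>
          have ha := hl a List.mem_cons_self
          rw [List.map_cons, if_neg (by simp [ha]),
            ih (fun q hq => hl q (List.mem_cons_of_mem _ hq))]
    have hins : (d.insert e.2.2 e.1).items = s ++ (e.2.2, e.1) :: t2 := by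
      rw [PySem.Dict.items_insert_of_contains d e.1 hc, hst]
      simp only [List.map_append, List.map_cons, BEq.rfl, if_pos rfl]
      rw [hfix s (fun q hq => by have := hs q hq; omega),
          hfix t2 (fun q hq => by have := ht q hq; omega)]
      simp
    rw [hins]
    unfold PySem.Dict.keys
    rw [hins]
    have hdeep : ((s ++ (e.2.2, e.1) :: t2).map (fun x => x.1)).filter
        (fun k => decide (e.2.2 < k)) = t2.map (fun x => x.1) := by
      simp only [List.map_append, List.map_cons, List.filter_append, List.filter_cons]
      rw [List.filter_eq_nil_iff.mpr (by
        intro k hk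
        obtain ⟨q, hq, rfl⟩ := List.mem_map.mp hk
        simpa using not_lt.mpr (le_of_lt (hs q hq)))]
      rw [List.filter_eq_self.mpr (by
        intro k hk
        obtain ⟨q, hq, rfl⟩ := List.mem_map.mp hk
        simpa using ht q hq)]
      simp
    rw [hdeep, hst]
    simp only [List.filter_append, List.filter_cons]
    have hkeeps : s.filter (fun p => !(t2.map (fun x => x.1)).contains p.1) = s := by
      apply List.filter_eq_self.mpr
      intro q hq
      have hnm : q.1 ∉ t2.map (fun x => x.1) := by
        intro hmem'
        obtain ⟨r, hr, hr1⟩ := List.mem_map.mp hmem'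
        have := ht r hr
        have := hs q hq
        omega
      simp [List.contains_eq_mem, hnm]
    have hsfilt : s.filter (fun p => decide (p.1 < e.2.2)) = s :=
      List.filter_eq_self.mpr (fun q hq => by simpa using hs q hq)
    have htdrop : t2.filter (fun p => !(t2.map (fun x => x.1)).contains p.1) = [] := by
      apply List.filter_eq_nil_iff.mpr
      intro q hq
      have hm : q.1 ∈ t2.map (fun x => x.1) := List.mem_map.mpr ⟨q, hq, rfl⟩
      simp [List.contains_eq_mem, hm]
    have htdrop2 : t2.filter (fun p => decide (p.1 < e.2.2)) = [] := by
      apply List.filter_eq_nil_iff.mpr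
      intro q hq
      simpa using not_lt.mpr (le_of_lt (ht q hq))
    have hLnm : e.2.2 ∉ t2.map (fun x => x.1) := by
      intro hmem'
      obtain ⟨r, hr, hr1⟩ := List.mem_map.mp hmem'
      have := ht r hr
      omega
    rw [hkeeps, hsfilt, htdrop, htdrop2]
    simp [List.contains_eq_mem, hLnm]
  · -- fresh level: the insert appends
    have hnotin : ∀ q ∈ d.items, q.1 ≠ e.2.2 := by
      intro q hq hqe
      apply hc
      apply (PySem.Dict.contains_iff_mem_keys d e.2.2).mpr
      unfold PySem.Dict.keys
      exact List.mem_map.mpr ⟨q, hq, hqe⟩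
    have hc' : d.contains e.2.2 = false := by
      cases hcc : d.contains e.2.2
      · rfl
      · exact absurd hcc hc
    have hins := PySem.Dict.items_insert_of_not_contains d e.1 hc'
    rw [hins]
    unfold PySem.Dict.keys
    rw [hins]
    have hdeep : ((d.items ++ [(e.2.2, e.1)]).map (fun x => x.1)).filter
        (fun k => decide (e.2.2 < k))
        = (d.items.map (fun x => x.1)).filter (fun k => decide (e.2.2 < k)) := by
      simp [List.filter_append]
    rw [hdeep]
    simp only [List.filter_append, List.filter_cons]
    have hLnm : e.2.2 ∉ (d.items.map (fun x => x.1)).filter (fun k => decide (e.2.2 < k)) := by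
      intro hmem'
      have := (List.mem_filter.mp hmem').2
      simp at this
    have hfilt : d.items.filter (fun p => !((d.items.map (fun x => x.1)).filter
        (fun k => decide (e.2.2 < k))).contains p.1)
        = d.items.filter (fun p => decide (p.1 < e.2.2)) := by
      apply List.filter_congr
      intro q hq
      have h1 : q.1 ≠ e.2.2 := hnotin q hq
      have h2 : q.1 ∈ d.items.map (fun x => x.1) := List.mem_map.mpr ⟨q, hq, rfl⟩
      by_cases hlt : q.1 < e.2.2
      · have hnm : q.1 ∉ (d.items.map (fun x => x.1)).filter (fun k => decide (e.2.2 < k)) := by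
          intro hmem'
          have := (List.mem_filter.mp hmem').2
          simp at this
          omega
        simp [List.contains_eq_mem, hnm, hlt]
      · have hgt : e.2.2 < q.1 := by omega
        have hm : q.1 ∈ (d.items.map (fun x => x.1)).filter (fun k => decide (e.2.2 < k)) :=
          List.mem_filter.mpr ⟨h2, by simpa using hgt⟩
        simp [List.contains_eq_mem, hm, hlt]
    rw [hfilt]
    simp [List.contains_eq_mem, hLnm]

theorem pv_aStep_pairwise (target : Int) (l : List (Int × String)) (e : String × Int × Int)
    (h : l.Pairwise (fun p q => p.1 < q.1)) :
    (pvAStep target l e).Pairwise (fun p q => p.1 < q.1) := by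
  unfold pvAStep
  split
  · apply List.pairwise_append.mpr
    refine ⟨h.filter _, List.pairwise_singleton _ _, ?_⟩
    intro p hp q hq
    simp only [List.mem_singleton] at hq
    subst hq
    have := List.of_mem_filter hp
    simpa using this
  · exact h

theorem pv_fold_items (target : Int) : ∀ (ne : List (String × Int × Int)) (d : PySem.Dict Int String),
    d.items.Pairwise (fun p q => p.1 < q.1) →
    (ne.foldl (pvA_step target) d).items = ne.foldl (pvAStep target) d.items ∧
    (ne.foldl (pvAStep target) d.items).Pairwise (fun p q => p.1 < q.1) := by
  intro ne
  induction ne with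
  | nil => intro d h; exact ⟨rfl, h⟩
  | cons e rest ih =>
      intro d h
      have hstep := pv_step_items target d e h
      have hpw := pv_aStep_pairwise target d.items e h
      have := ih (pvA_step target d e) (by rw [hstep]; exact hpw)
      rw [List.foldl_cons, List.foldl_cons]
      constructor
      · rw [this.1, hstep]
      · rw [← hstep]; exact this.2

theorem pv_numericEntries_go : ∀ (m : List (String × String × Int)) (acc : List (String × Int × Int)),
    m.foldl (fun acc e =>
      match PySem.Int.ofStr? e.2.1 with
      | some n => acc ++ [(e.1, n, e.2.2)]
      | none => acc) acc
    = acc ++ m.flatMap (fun e =>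
      match PySem.Int.ofStr? e.2.1 with
      | some n => [(e.1, n, e.2.2)]
      | none => []) := by
  intro m
  induction m with
  | nil => simp
  | cons e rest ih =>
      intro acc
      cases h : PySem.Int.ofStr? e.2.1 with
      | some n => simp [List.foldl_cons, List.flatMap_cons, h, ih]
      | none => simp [List.foldl_cons, List.flatMap_cons, h, ih]

theorem pv_qualifying_go (target : Int) : ∀ (m : List (String × String × Int)) (acc : List (String × Int)),
    m.foldl (fun acc e =>
      match PySem.Int.ofStr? e.2.1 with
      | some n => if n ≤ target then acc ++ [(e.1, e.2.2)] else acc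
      | none => acc) acc
    = acc ++ m.flatMap (fun e =>
      match PySem.Int.ofStr? e.2.1 with
      | some n => if n ≤ target then [(e.1, e.2.2)] else []
      | none => []) := by
  intro m
  induction m with
  | nil => simp
  | cons e rest ih =>
      intro acc
      cases h : PySem.Int.ofStr? e.2.1 with
      | some n =>
          by_cases hn : n ≤ target <;>
            simp [List.foldl_cons, List.flatMap_cons, h, hn, ih]
      | none => simp [List.foldl_cons, List.flatMap_cons, h, ih]

theorem pv_qual_eq (target : Int) (m : List (String × String × Int)) :
    pvB_qualifying m target = pvQualOf target (pvA_numericEntries m) := by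
  unfold pvB_qualifying pvA_numericEntries
  rw [pv_qualifying_go, pv_numericEntries_go]
  simp only [List.nil_append]
  unfold pvQualOf
  induction m with
  | nil => rfl
  | cons e rest ih =>
      simp only [List.flatMap_cons, List.filter_append, List.map_append, ← ih]
      congr 1
      cases h : PySem.Int.ofStr? e.2.1 with
      | some n => by_cases hn : n ≤ target <;> simp [h, hn, List.filter_cons]
      | none => simp [h]

theorem pv_pass_fold : ∀ (xs : List (String × Int)) (acc : List (String × Int)) (m : Option Int),
    (xs.foldl (fun (st : List (String × Int) × Option Int) e =>
      match st.2 with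
      | none => (st.1 ++ [e], some e.2)
      | some b => if e.2 < b then (st.1 ++ [e], some e.2) else st) (acc, m)).1
    = acc ++ pvPass xs m := by
  intro xs
  induction xs with
  | nil => intro acc m; simp [pvPass]
  | cons e rest ih =>
      intro acc m
      cases m with
      | none => simp [List.foldl_cons, pvPass, pvLtO, ih]
      | some b =>
          by_cases hb : e.2 < b <;>
            simp [List.foldl_cons, pvPass, pvLtO, hb, ih]

theorem pv_core (target : Int) : ∀ (q : List (String × Int × Int)) (m : Option Int),
    (pvPass ((pvQualOf target q).reverse) m).reverse
    = ((q.foldl (pvAStep target) []).filter (fun p => pvLtO p.1 m)).map (fun p => (p.2, p.1)) := by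
  intro q m
  induction q using List.reverseRecOn generalizing m with
  | nil => simp [pvQualOf, pvPass]
  | append_singleton q x ih =>
      have hqual : pvQualOf target (q ++ [x])
          = pvQualOf target q ++ pvQualOf target [x] := by
        simp [pvQualOf]
      rw [hqual, List.foldl_append, List.foldl_cons, List.foldl_nil]
      by_cases hx : x.2.1 ≤ target
      · have hq1 : pvQualOf target [x] = [(x.1, x.2.2)] := by
          simp [pvQualOf, hx]
        have hstep : pvAStep target (q.foldl (pvAStep target) []) x
            = (q.foldl (pvAStep target) []).filter (fun p => decide (p.1 < x.2.2))
              ++ [(x.2.2, x.1)] := by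
          unfold pvAStep
          rw [if_pos hx]
        rw [hq1, hstep, List.reverse_append, List.reverse_singleton, List.singleton_append]
        show (pvPass ((x.1, x.2.2) :: (pvQualOf target q).reverse) m).reverse = _
        rw [List.filter_append, List.map_append, List.filter_filter]
        by_cases hl : pvLtO x.2.2 m = true
        · rw [pvPass, if_pos hl, List.reverse_cons, ih (some x.2.2)]
          have hff : (q.foldl (pvAStep target) []).filter
              (fun a => pvLtO a.1 m && decide (a.1 < x.2.2))
              = (q.foldl (pvAStep target) []).filter (fun p => pvLtO p.1 (some x.2.2)) := by
            apply List.filter_congr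
            intro p _
            show (pvLtO p.1 m && decide (p.1 < x.2.2)) = pvLtO p.1 (some x.2.2)
            cases m with
            | none => simp [pvLtO]
            | some b =>
                simp only [pvLtO, decide_eq_true_eq] at hl ⊢
                by_cases h1 : p.1 < x.2.2 <;> by_cases h2 : p.1 < b <;> simp [h1, h2] <;> omega
          rw [hff]
          have hkeep : List.filter (fun p => pvLtO p.1 m) [((x.2.2 : Int), x.1)]
              = [(x.2.2, x.1)] := by
            simp [List.filter_cons, hl]
          rw [hkeep]
          simp
        · have hl' : pvLtO x.2.2 m = false := by
            cases hll : pvLtO x.2.2 m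
            · rfl
            · exact absurd hll hl
          rw [pvPass, if_neg (by simp [hl']), ih m]
          have hff : (q.foldl (pvAStep target) []).filter
              (fun a => pvLtO a.1 m && decide (a.1 < x.2.2))
              = (q.foldl (pvAStep target) []).filter (fun p => pvLtO p.1 m) := by
            apply List.filter_congr
            intro p _
            show (pvLtO p.1 m && decide (p.1 < x.2.2)) = pvLtO p.1 m
            cases m with
            | none => simp [pvLtO] at hl'
            | some b =>
                have hnl : ¬ x.2.2 < b := by simpa [pvLtO] using hl'
                by_cases h1 : p.1 < x.2.2 <;> by_cases h2 : p.1 < b <;>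
                  simp [pvLtO, h1, h2] <;> omega
          rw [hff]
          have hdrop : List.filter (fun p => pvLtO p.1 m) [((x.2.2 : Int), x.1)] = [] := by
            simp [List.filter_cons, hl']
          rw [hdrop]
          simp
      · have hq0 : pvQualOf target [x] = [] := by
          simp [pvQualOf, hx]
        have hstep : pvAStep target (q.foldl (pvAStep target) []) x
            = q.foldl (pvAStep target) [] := by
          unfold pvAStep
          rw [if_neg hx]
        rw [hq0, hstep, List.append_nil, ih m]

theorem pv_numeric_eq (m : List (String × String × Int)) (target : Int) :
    pvA_numeric m target = pvB_numeric m target := by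
  have hempty : (PySem.Dict.empty : PySem.Dict Int String).items = [] := rfl
  have hfold := pv_fold_items target (pvA_numericEntries m) PySem.Dict.empty
    (by rw [hempty]; exact List.Pairwise.nil)
  rw [hempty] at hfold
  set ne := pvA_numericEntries m with hne
  set l := ne.foldl (pvAStep target) [] with hl
  have hpw : l.Pairwise (fun p q => p.1 < q.1) := hfold.2
  have hmap : (l.map (fun p => (p.2, p.1))).Pairwise (fun a b => a.2 < b.2) :=
    List.pairwise_map.mpr hpw
  have hA : pvA_numeric m target
      = PySem.List.sorted (l.map (fun p => (p.2, p.1))) (fun x => x.2) := by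
    unfold pvA_numeric
    rw [← hne]
    by_cases h0 : ne = []
    · rw [if_pos h0]
      rw [hl, h0]
      rfl
    · rw [if_neg h0]
      simp only [hfold.1, ← hl]
      by_cases h1 : l = []
      · rw [if_pos h1, h1]
        rfl
      · rw [if_neg h1]
  have hB : pvB_numeric m target
      = PySem.List.sorted (pvPass ((pvQualOf target ne).reverse) none) (fun x => x.2) := by
    unfold pvB_numeric
    simp only [pv_qual_eq, pv_pass_fold, List.nil_append]
    rw [← hne]
  have hpass : pvPass ((pvQualOf target ne).reverse) none = (l.map (fun p => (p.2, p.1))).reverse := by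
    have hcore := pv_core target ne none
    rw [← hl] at hcore
    have hfilt : l.filter (fun p => pvLtO p.1 none) = l :=
      List.filter_eq_self.mpr (fun p _ => rfl)
    rw [hfilt] at hcore
    rw [← hcore, List.reverse_reverse]
  rw [hA, hB, hpass]
  rw [PySem.List.sorted_eq_self_of_pairwise _ _ (hmap.imp (fun h => le_of_lt h))]
  exact (PySem.List.sorted_eq_of_perm_of_pairwise_lt _ _ _
    ((List.reverse_perm _).symm) hmap).symm

-- ===== VERDICT (by name: the statement is the Claim_ definition above) =====
theorem get_chapters_for_page_spec : Claim_equal_get_chapters_for_page := by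
  intro chapter_map page_label _
  unfold Spec_get_chapters_for_page get_chapters_for_page get_chapters_for_page_alt
  by_cases hcm : chapter_map = []
  · simp [hcm]
  · simp only [if_neg hcm]
    cases PySem.Int.ofStr? page_label with
    | some target => simp only [pv_numeric_eq]
    | none => simp only [pv_nonnum_eq]
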